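-- pv_equiv track=rewrite | github.com/lkrych/aoc | 20/python/aoc11.py | check_down_left
-- ===== SOURCE A (Python) =====
-- def check_down_left(data, x, y):
--     if y + 1 < len(data) and x - 1 >= 0:
--         val = data[y+1][x-1]
--         if val == "#" or val == "L":
--             return val
--         else:
--             return check_down_left(data, x-1, y+1)
--     else:
--         return ""
-- ===== SOURCE B (Python) =====
-- def check_down_left(data, x, y):
--     steps = min(len(data) - y - 1, x)
--     for k in range(1, steps + 1):
--         val = data[y + k][x - k]
--         if val == "#" or val == "L":
--             return val
--     return ""
-- ===== Notes on version B (the rewrite author's own statement) =====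
-- stated objective: alternative
-- what changed: A's recursion that carries mutating (x, y) coordinates is replaced by computing the number of diagonal steps up front (min(len(data)-y-1, x)) and scanning offsets k = 1..steps in a single for loop.
-- outside the precondition, e.g. on check_down_left(['##', '#'], 2, -1): A returns '#', B returns '#'; on check_down_left(['#', 'L'], 1, -3): A returns '#', B returns '#'
import Mathlib
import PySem

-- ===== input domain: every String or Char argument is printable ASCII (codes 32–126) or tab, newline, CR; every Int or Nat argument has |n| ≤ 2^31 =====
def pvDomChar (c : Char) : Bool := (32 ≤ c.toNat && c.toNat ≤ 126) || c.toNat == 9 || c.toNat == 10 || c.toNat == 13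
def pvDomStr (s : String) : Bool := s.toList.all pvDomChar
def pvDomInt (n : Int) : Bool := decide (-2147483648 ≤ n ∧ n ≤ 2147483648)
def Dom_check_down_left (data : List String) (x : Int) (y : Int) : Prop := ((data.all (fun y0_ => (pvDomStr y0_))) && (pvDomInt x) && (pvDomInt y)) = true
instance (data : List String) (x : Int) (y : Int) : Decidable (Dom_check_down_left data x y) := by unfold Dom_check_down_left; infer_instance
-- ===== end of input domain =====

-- B replaces A's coordinate-carrying recursion by computing the diagonal's step count up front
-- and scanning offsets k = 1..steps with a single loop (objective: alternative decomposition).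


-- ===== PORT A =====
-- literal transliteration of A's recursion; 'none' from pyGet? is Python's IndexError, excluded by Pre_
def check_down_left (data : List String) (x : Int) (y : Int) : String :=
  if _h : y + 1 < (data.length : Int) ∧ 0 ≤ x - 1 then
    match (PySem.List.pyGet? data (y + 1)).bind (fun row => PySem.Str.pyGet? row (x - 1)) with
    | some c => if c = '#' ∨ c = 'L' then String.ofList [c] else check_down_left data (x - 1) (y + 1)
    | none => ""          -- IndexError in Python; outside Pre_
  else ""
termination_by ((data.length : Int) - (y + 1)).toNat
decreasing_by omega

-- ===== PORT B =====
-- B's for-loop with early return, as recursion over the precomputed list of offsets k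
def cdl_scan (data : List String) (x : Int) (y : Int) : List Int → String
  | [] => ""
  | k :: ks =>
    match (PySem.List.pyGet? data (y + k)).bind (fun row => PySem.Str.pyGet? row (x - k)) with
    | some c => if c = '#' ∨ c = 'L' then String.ofList [c] else cdl_scan data x y ks
    | none => cdl_scan data x y ks   -- IndexError in Python; outside Pre_

def check_down_left_alt (data : List String) (x : Int) (y : Int) : String :=
  let steps : Int := min ((data.length : Int) - y - 1) x
  cdl_scan data x y (PySem.List.pyRange 1 (steps + 1))

-- ===== PRECONDITION & SPEC =====
-- Pre_ excludes inputs where the scan would raise IndexError or use Python's negative-index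
-- wraparound; it is conservative: whenever the first step is taken it requires y ≥ -1 and every
-- row longer than x-1, so some short-row / negative-y inputs on which A still returns are excluded.
def Pre_check_down_left (data : List String) (x : Int) (y : Int) : Prop :=
  (y + 1 < (data.length : Int) ∧ 0 ≤ x - 1) →
    (-1 ≤ y ∧ ∀ r ∈ data, x - 1 < PySem.Str.len r)
instance (data : List String) (x : Int) (y : Int) : Decidable (Pre_check_down_left data x y) := by
  unfold Pre_check_down_left; infer_instance

def pvWitness_check_down_left : List String × Int × Int := (["...", ".#.", "L.."], 2, 0)

def Spec_check_down_left (data : List String) (x : Int) (y : Int) (out : String) : Prop := out = check_down_left_alt data x y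
instance (data : List String) (x : Int) (y : Int) (out : String) : Decidable (Spec_check_down_left data x y out) := by unfold Spec_check_down_left; infer_instance

-- ===== CLAIM (what is proved, stated in full; the proofs are below) =====
def Claim_equal_check_down_left : Prop := ∀ (data : List String) (x : Int) (y : Int), Dom_check_down_left data x y → Pre_check_down_left data x y → Spec_check_down_left data x y (check_down_left data x y)

-- ===== LEMMAS AND PROOFS =====

theorem cdl_scan_map_succ (data : List String) (x y : Int) (ks : List Int) :
    cdl_scan data x y (ks.map (· + 1)) = cdl_scan data (x - 1) (y + 1) ks := by
  induction ks with
  | nil => rfl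
  | cons k ks ih =>
    simp only [List.map_cons, cdl_scan]
    have h1 : y + (k + 1) = y + 1 + k := by ring
    have h2 : x - (k + 1) = x - 1 - k := by ring
    rw [h1, h2, ih]

theorem pyRange_succ_shift (s : Int) :
    PySem.List.pyRange 2 (s + 1) = (PySem.List.pyRange 1 s).map (· + 1) := by
  rw [PySem.List.pyRange_one, PySem.List.pyRange_one, List.map_map]
  have h : (s + 1 - 2).toNat = (s - 1).toNat := by omega
  rw [h]
  apply List.map_congr_left
  intro k _
  simp; ring

theorem cdl_aux (data : List String) :
    ∀ (n : Nat) (x y : Int), (data.length : Int) - (y + 1) ≤ n →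
      Pre_check_down_left data x y →
      check_down_left data x y = check_down_left_alt data x y := by
  intro n
  induction n with
  | zero =>
    intro x y hn _
    have hg : ¬ (y + 1 < (data.length : Int) ∧ 0 ≤ x - 1) := by omega
    rw [check_down_left, dif_neg hg]
    show "" = cdl_scan data x y (PySem.List.pyRange 1 (min ((data.length : Int) - y - 1) x + 1))
    rw [PySem.List.pyRange_one]
    have : (min ((data.length : Int) - y - 1) x + 1 - 1).toNat = 0 := by omega
    rw [this]
    rfl
  | succ n ih =>
    intro x y hn hpre
    by_cases hg : y + 1 < (data.length : Int) ∧ 0 ≤ x - 1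
    · obtain ⟨hpy, hrows⟩ := hpre hg
      -- the accessed cell exists
      have hyt : (y + 1).toNat < data.length := by omega
      have hrow : PySem.List.pyGet? data (y + 1) = some data[(y + 1).toNat] := by
        rw [PySem.List.pyGet?_of_nonneg data (by omega : (0:Int) ≤ y + 1)]
        exact List.getElem?_eq_getElem hyt
      have hmem : data[(y + 1).toNat] ∈ data := List.getElem_mem hyt
      set row := data[(y + 1).toNat] with hrdef
      have hlen : x - 1 < (row.toList.length : Int) := by
        have := hrows row hmem
        rwa [PySem.Str.len_eq] at this
      have hxn : (x - 1).toNat < row.toList.length := by omega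
      have hcast : x - 1 = ((x - 1).toNat : Int) := by omega
      have hchar' : PySem.Str.pyGet? row (x - 1) = row.toList[(x - 1).toNat]? := by
        rw [hcast]
        simp
      have hchar : PySem.Str.pyGet? row (x - 1) = some row.toList[(x - 1).toNat] :=
        hchar'.trans (List.getElem?_eq_getElem hxn)
      set c := row.toList[(x - 1).toNat] with hcdef
      -- steps ≥ 1, so the offset list starts with 1
      have hs1 : (1 : Int) < min ((data.length : Int) - y - 1) x + 1 := by omega
      rw [check_down_left, dif_pos hg]
      show _ = cdl_scan data x y (PySem.List.pyRange 1 (min ((data.length : Int) - y - 1) x + 1))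
      rw [PySem.List.pyRange_one_cons hs1]
      simp only [hrow, hchar, Option.bind_some, cdl_scan]
      by_cases hc : c = '#' ∨ c = 'L'
      · rw [if_pos hc, if_pos hc]
      · rw [if_neg hc, if_neg hc]
        have hshift : min ((data.length : Int) - y - 1) x + 1 = (min ((data.length : Int) - (y + 1) - 1) (x - 1) + 1) + 1 := by omega
        rw [hshift]
        show _ = cdl_scan data x y (PySem.List.pyRange 2 (min ((data.length : Int) - (y + 1) - 1) (x - 1) + 1 + 1))
        rw [pyRange_succ_shift, cdl_scan_map_succ]
        have hrec := ih (x - 1) (y + 1) (by omega) (by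
          intro hg'
          refine ⟨by omega, ?_⟩
          intro r hr
          have := hrows r hr
          omega)
        rw [hrec]
        rfl
    · rw [check_down_left, dif_neg hg]
      show "" = cdl_scan data x y (PySem.List.pyRange 1 (min ((data.length : Int) - y - 1) x + 1))
      rw [PySem.List.pyRange_one]
      have : (min ((data.length : Int) - y - 1) x + 1 - 1).toNat = 0 := by omega
      rw [this]
      rfl

-- ===== VERDICT (by name: the statement is the Claim_ definition above) =====
theorem check_down_left_spec : Claim_equal_check_down_left := by
  intro data x y _ hpre
  unfold Spec_check_down_left
  exact cdl_aux data ((data.length : Int) - (y + 1)).toNat x y (by omega) hpre
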